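-- pv_equiv track=rewrite | github.com/Eric-Robert-Lawson/OrganismCore | qualia_candidate_axioms/historical/Solen/pt9/rush_e_choir.py | classify_rush_e
-- ===== SOURCE A (Python) =====
-- def classify_rush_e(voice):
--     total  = len(voice)
--     # s1: 20 notes, s2: 12 notes, s3: 6 notes
--     s1_end = 20
--     s2_end = 32
--     sections = []
--     for i in range(total):
--         if i < s1_end:
--             sections.append(1)
--         elif i < s2_end:
--             sections.append(2)
--         else:
--             sections.append(3)
--     return sections
-- ===== SOURCE B (Python) =====
-- def classify_rush_e(voice):
--     total = len(voice)
--     n1 = min(total, 20)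
--     n2 = max(0, min(total, 32) - 20)
--     n3 = max(0, total - 32)
--     return [1] * n1 + [2] * n2 + [3] * n3
-- ===== Notes on version B (the rewrite author's own statement) =====
-- stated objective: simpler
-- what changed: Replaces the per-index loop with three-way conditionals by an arithmetic computation of the three section lengths and block construction via list repetition.
import Mathlib
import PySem

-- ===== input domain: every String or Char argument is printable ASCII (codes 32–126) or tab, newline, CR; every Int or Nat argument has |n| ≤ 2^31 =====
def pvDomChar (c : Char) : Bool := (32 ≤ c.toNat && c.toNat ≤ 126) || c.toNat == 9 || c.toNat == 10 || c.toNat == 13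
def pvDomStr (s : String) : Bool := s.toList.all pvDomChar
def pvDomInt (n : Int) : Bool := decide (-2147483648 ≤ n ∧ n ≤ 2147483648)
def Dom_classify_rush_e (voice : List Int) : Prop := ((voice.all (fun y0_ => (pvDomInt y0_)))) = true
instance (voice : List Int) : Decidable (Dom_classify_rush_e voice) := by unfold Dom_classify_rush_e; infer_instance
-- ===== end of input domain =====

-- ===== PORT A =====
-- literal port of A: loop over range(total) appending 1/2/3 by the index comparisons
def classify_rush_e (voice : List Int) : List Int :=
  let total : Int := voice.length
  let s1_end : Int := 20
  let s2_end : Int := 32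
  (PySem.List.pyRange 0 total 1).foldl
    (fun sections i =>
      if i < s1_end then sections ++ [(1 : Int)]
      else if i < s2_end then sections ++ [(2 : Int)]
      else sections ++ [(3 : Int)]) []

-- ===== PORT B =====
-- port of B: compute the three section lengths arithmetically, build blocks by replication
def classify_rush_e_alt (voice : List Int) : List Int :=
  let total := voice.length
  let n1 := min total 20
  let n2 := min total 32 - 20   -- Nat subtraction clamps at 0, matching Source B's max(0, ...)
  let n3 := total - 32
  List.replicate n1 (1 : Int) ++ List.replicate n2 (2 : Int) ++ List.replicate n3 (3 : Int)

-- ===== PRECONDITION & SPEC =====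
def Spec_classify_rush_e (voice : List Int) (out : List Int) : Prop := out = classify_rush_e_alt voice
instance (voice : List Int) (out : List Int) : Decidable (Spec_classify_rush_e voice out) := by unfold Spec_classify_rush_e; infer_instance

-- ===== CLAIM (what is proved, stated in full; the proofs are below) =====
def Claim_equal_classify_rush_e : Prop := ∀ (voice : List Int), Dom_classify_rush_e voice → Spec_classify_rush_e voice (classify_rush_e voice)

-- ===== LEMMAS AND PROOFS =====

-- ===== VERDICT (by name: the statement is the Claim_ definition above) =====
-- the closed form of B, as a function of the length only
def pvBlocks (n : Nat) : List Int :=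
  List.replicate (min n 20) 1 ++ List.replicate (min n 32 - 20) 2 ++ List.replicate (n - 32) 3

theorem pvLoopEqBlocks (n : Nat) :
    (PySem.List.pyRange 0 (n : Int) 1).foldl
      (fun sections i =>
        if i < (20 : Int) then sections ++ [(1 : Int)]
        else if i < (32 : Int) then sections ++ [(2 : Int)]
        else sections ++ [(3 : Int)]) [] = pvBlocks n := by
  induction n with
  | zero => simp [PySem.List.pyRange_one_eq_nil, pvBlocks]
  | succ k ih =>
    have h : ((k + 1 : Nat) : Int) = (k : Int) + 1 := by push_cast; ring
    rw [h, PySem.List.pyRange_one_succ_right (by positivity), List.foldl_append, ih]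
    simp only [List.foldl_cons, List.foldl_nil, pvBlocks]
    by_cases h1 : (k : Int) < 20
    · have hk : k < 20 := by exact_mod_cast h1
      simp only [if_pos h1]
      have : min (k+1) 20 = min k 20 + 1 := by omega
      rw [this, List.replicate_succ' (n := min k 20)]
      have e2 : min (k+1) 32 - 20 = min k 32 - 20 := by omega
      have e3 : (k+1) - 32 = k - 32 := by omega
      have z2 : min k 32 - 20 = 0 := by omega
      have z3 : k - 32 = 0 := by omega
      rw [e2, e3, z2, z3]; simp
    · by_cases h2 : (k : Int) < 32
      · have hk1 : ¬ k < 20 := by intro hh; exact h1 (by exact_mod_cast hh)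
        have hk2 : k < 32 := by exact_mod_cast h2
        simp only [if_neg h1, if_pos h2]
        have e1 : min (k+1) 20 = min k 20 := by omega
        have e2 : min (k+1) 32 - 20 = (min k 32 - 20) + 1 := by omega
        have e3 : (k+1) - 32 = k - 32 := by omega
        have z3 : k - 32 = 0 := by omega
        rw [e1, e2, e3, z3, List.replicate_succ' (n := min k 32 - 20)]; simp
      · have hk2 : ¬ k < 32 := by intro hh; exact h2 (by exact_mod_cast hh)
        simp only [if_neg h1, if_neg h2]
        have e1 : min (k+1) 20 = min k 20 := by omega
        have e2 : min (k+1) 32 - 20 = min k 32 - 20 := by omega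
        have e3 : (k+1) - 32 = (k - 32) + 1 := by omega
        rw [e1, e2, e3, List.replicate_succ' (n := k - 32)]; simp

theorem classify_rush_e_spec : Claim_equal_classify_rush_e := by
  intro voice _
  show classify_rush_e voice = classify_rush_e_alt voice
  unfold classify_rush_e classify_rush_e_alt
  exact pvLoopEqBlocks voice.length
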